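-- pv_equiv track=rewrite | github.com/The-Red-Wizard/zeus768 | plugin.program.theaccountant/service.py | format_changelog
-- ===== SOURCE A (Python) =====
-- def format_changelog(content):
--     """Format changelog with Kodi color tags for better readability"""
--     lines = content.split('\n')
--     formatted_lines = []
--
--     for line in lines:
--         stripped = line.strip()
--
--         # Version headers - cyan
--         if stripped.startswith('v') and '(' in stripped:
--             formatted_lines.append(f'[COLOR cyan][B]{line}[/B][/COLOR]')
--         # Section headers with === - yellow
--         elif '===' in stripped:
--             formatted_lines.append(f'[COLOR yellow]{line}[/COLOR]')
--         # NEW/FIXED/IMPROVEMENTS headers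
--         elif stripped.startswith('NEW') or stripped.startswith('FIXED') or stripped.startswith('BUG FIX'):
--             formatted_lines.append(f'[COLOR lime]{line}[/COLOR]')
--         elif stripped.startswith('IMPROVEMENTS') or stripped.startswith('PRESERVED'):
--             formatted_lines.append(f'[COLOR orange]{line}[/COLOR]')
--         # Bullet points
--         elif stripped.startswith('-'):
--             formatted_lines.append(f'[COLOR white]{line}[/COLOR]')
--         # Numbered items
--         elif stripped and stripped[0].isdigit() and '.' in stripped[:3]:
--             formatted_lines.append(f'[COLOR lightgray]{line}[/COLOR]')
--         else:
--             formatted_lines.append(line)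
--
--     return '\n'.join(formatted_lines)
-- ===== SOURCE B (Python) =====
-- def _classify(s):
--     """Return the (open_tag, close_tag) pair for a stripped line, or None."""
--     if s.startswith('v') and '(' in s:
--         return '[COLOR cyan][B]', '[/B][/COLOR]'
--     if '===' in s:
--         return '[COLOR yellow]', '[/COLOR]'
--     if s.startswith(('NEW', 'FIXED', 'BUG FIX')):
--         return '[COLOR lime]', '[/COLOR]'
--     if s.startswith(('IMPROVEMENTS', 'PRESERVED')):
--         return '[COLOR orange]', '[/COLOR]'
--     if s.startswith('-'):
--         return '[COLOR white]', '[/COLOR]'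
--     if s and s[0].isdigit() and '.' in s[:3]:
--         return '[COLOR lightgray]', '[/COLOR]'
--     return None
--
--
-- def _decorate(line):
--     tags = _classify(line.strip())
--     if tags is None:
--         return line
--     return tags[0] + line + tags[1]
--
--
-- def format_changelog(content):
--     """Format changelog with Kodi color tags: one streaming pass over the
--     characters, buffering the current line and emitting it decorated at each
--     newline (no split/join over a lines list)."""
--     out = []
--     buf = []
--     for ch in content:
--         if ch == '\n':
--             out.append(_decorate(''.join(buf)))
--             out.append('\n')
--             buf = []
--         else:
--             buf.append(ch)
--     out.append(_decorate(''.join(buf)))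
--     return ''.join(out)
-- ===== Notes on version B (the rewrite author's own statement) =====
-- stated objective: alternative
-- what changed: A splits the text into a lines list, runs an elif chain per line and joins; B makes one streaming pass over the characters, buffering the current line and flushing it (wrapped via a factored-out tag-classification helper) at each newline, with no split/join over a lines list.
import Mathlib
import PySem

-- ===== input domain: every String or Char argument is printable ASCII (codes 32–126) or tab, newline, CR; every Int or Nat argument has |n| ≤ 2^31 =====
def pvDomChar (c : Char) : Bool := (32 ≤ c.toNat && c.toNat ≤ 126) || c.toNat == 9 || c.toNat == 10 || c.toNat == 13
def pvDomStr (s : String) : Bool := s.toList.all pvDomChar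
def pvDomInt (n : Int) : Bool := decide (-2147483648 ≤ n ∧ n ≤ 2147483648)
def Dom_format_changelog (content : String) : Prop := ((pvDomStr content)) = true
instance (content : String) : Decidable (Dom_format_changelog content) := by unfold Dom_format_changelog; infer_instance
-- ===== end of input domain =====

-- B replaces A's split-lines/elif-chain/join pipeline by one streaming pass over the characters
-- (buffering the current line, emitting it decorated at each newline), with the tag pair factored
-- into a classification helper (objective: alternative; same cost).

-- ===== PORT A =====
-- A's per-line elif chain, branch for branch (the loop body of A).
def pvFmtA (line : String) : String :=
  let stripped := PySem.Str.strip line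
  if PySem.Str.startswith stripped "v" && PySem.Str.isIn "(" stripped then
    "[COLOR cyan][B]" ++ line ++ "[/B][/COLOR]"
  else if PySem.Str.isIn "===" stripped then
    "[COLOR yellow]" ++ line ++ "[/COLOR]"
  else if PySem.Str.startswith stripped "NEW" || PySem.Str.startswith stripped "FIXED" ||
      PySem.Str.startswith stripped "BUG FIX" then
    "[COLOR lime]" ++ line ++ "[/COLOR]"
  else if PySem.Str.startswith stripped "IMPROVEMENTS" || PySem.Str.startswith stripped "PRESERVED" then
    "[COLOR orange]" ++ line ++ "[/COLOR]"
  else if PySem.Str.startswith stripped "-" then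
    "[COLOR white]" ++ line ++ "[/COLOR]"
  else if (!(PySem.Str.len stripped == 0)) &&
      (match PySem.Str.pyGet? stripped 0 with | some c => PySem.Chars.isdigit c | none => false) &&
      PySem.Str.isIn "." (PySem.Str.slice stripped none (some 3)) then
    "[COLOR lightgray]" ++ line ++ "[/COLOR]"
  else
    line

-- A: split on '\n' (sep nonempty, so split? is always some), accumulate the formatted lines, join.
def format_changelog (content : String) : String :=
  let lines := (PySem.Str.split? content "\n").getD []
  let formatted_lines := lines.foldl (fun acc line => acc ++ [pvFmtA line]) []
  PySem.Str.join "\n" formatted_lines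

-- ===== PORT B =====
-- B's _classify: the (open_tag, close_tag) pair for a stripped line, or none.
def pvClassify (s : List Char) : Option (List Char × List Char) :=
  if PySem.Chars.startswith s "v".toList && PySem.Chars.isIn "(".toList s then
    some ("[COLOR cyan][B]".toList, "[/B][/COLOR]".toList)
  else if PySem.Chars.isIn "===".toList s then
    some ("[COLOR yellow]".toList, "[/COLOR]".toList)
  else if PySem.Chars.startswith s "NEW".toList || PySem.Chars.startswith s "FIXED".toList ||
      PySem.Chars.startswith s "BUG FIX".toList then
    some ("[COLOR lime]".toList, "[/COLOR]".toList)
  else if PySem.Chars.startswith s "IMPROVEMENTS".toList ||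
      PySem.Chars.startswith s "PRESERVED".toList then
    some ("[COLOR orange]".toList, "[/COLOR]".toList)
  else if PySem.Chars.startswith s "-".toList then
    some ("[COLOR white]".toList, "[/COLOR]".toList)
  else if (!(s.length == 0)) &&
      (match PySem.Chars.pyGet? s 0 with | some c => PySem.Chars.isdigit c | none => false) &&
      PySem.Chars.isIn ".".toList (PySem.Chars.slice s none (some 3)) then
    some ("[COLOR lightgray]".toList, "[/COLOR]".toList)
  else none

-- B's _decorate: wrap the line in its tags if it classifies.
def pvDecorate (line : List Char) : List Char :=
  match pvClassify (PySem.Chars.strip line) with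
  | some t => t.1 ++ line ++ t.2
  | none => line

-- B's loop body: on '\n' flush the buffered line (decorated) and the newline, else buffer the char.
def pvStep (st : List (List Char) × List Char) (c : Char) : List (List Char) × List Char :=
  if c = '\n' then (st.1 ++ [pvDecorate st.2, ['\n']], ([] : List Char))
  else (st.1, st.2 ++ [c])

-- B: one pass over the characters; final flush of the last buffered line; join the pieces.
def format_changelog_alt (content : String) : String :=
  let st := content.toList.foldl pvStep ([], [])
  String.ofList (st.1 ++ [pvDecorate st.2]).flatten

-- ===== PRECONDITION & SPEC =====
def Spec_format_changelog (content : String) (out : String) : Prop := out = format_changelog_alt content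
instance (content : String) (out : String) : Decidable (Spec_format_changelog content out) := by unfold Spec_format_changelog; infer_instance

-- ===== CLAIM (what is proved, stated in full; the proofs are below) =====
def Claim_equal_format_changelog : Prop := ∀ (content : String), Dom_format_changelog content → Spec_format_changelog content (format_changelog content)

-- ===== LEMMAS AND PROOFS =====

-- splitting on '\n', written as plain structural recursion (proof-side spec of Chars.splitOn _ ['\n'])
def pvSplitNL : List Char → List Char → List (List Char)
  | [], cur => [cur]
  | c :: rest, cur => if c = '\n' then cur :: pvSplitNL rest [] else pvSplitNL rest (cur ++ [c])

theorem pvSplitNL_ne_nil (l cur : List Char) : pvSplitNL l cur ≠ [] := by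
  induction l generalizing cur with
  | nil => simp [pvSplitNL]
  | cons c rest ih => by_cases h : c = '\n' <;> simp [pvSplitNL, h, ih]

theorem pvGo_eq (l : List Char) : ∀ (fuel : Nat) (cur : List Char) (acc : List (List Char)), l.length ≤ fuel →
    PySem.Chars.splitOn.go ['\n'] fuel l cur acc = acc.reverse ++ pvSplitNL l cur.reverse := by
  induction l with
  | nil =>
    intro fuel cur acc _
    rw [PySem.Chars.splitOn.go.eq_def]
    cases fuel <;> simp [pvSplitNL]
  | cons c rest ih =>
    intro fuel cur acc h
    obtain ⟨n, rfl⟩ : ∃ n, fuel = n + 1 := ⟨fuel - 1, by simp at h; omega⟩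
    rw [PySem.Chars.splitOn.go.eq_def]
    simp only [List.isPrefixOf]
    by_cases hc : c = '\n'
    · subst hc
      simp only [beq_self_eq_true, Bool.true_and]
      rw [if_pos (by simp)]
      rw [show List.drop ['\n'].length ('\n' :: rest) = rest from rfl]
      rw [ih n [] (cur.reverse :: acc) (by simpa using Nat.le_of_succ_le_succ h)]
      simp [pvSplitNL]
    · rw [if_neg (by simp; intro h'; exact hc h'.symm)]
      rw [ih n (c :: cur) acc (by simpa using Nat.le_of_succ_le_succ h)]
      simp [pvSplitNL, hc]

theorem pvSplitOn_eq (l : List Char) : PySem.Chars.splitOn l ['\n'] = pvSplitNL l [] := by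
  rw [PySem.Chars.splitOn, pvGo_eq l (l.length + 1) [] [] (by omega)]
  simp

-- B's stream invariant: the flushed pieces are the decorated split lines joined with '\n'.
theorem pvStream_inv (l : List Char) : ∀ (out : List (List Char)) (buf : List Char),
    ((l.foldl pvStep (out, buf)).1 ++ [pvDecorate (l.foldl pvStep (out, buf)).2]).flatten
      = out.flatten ++ PySem.Chars.join ['\n'] ((pvSplitNL l buf).map pvDecorate) := by
  induction l with
  | nil =>
    intro out buf
    simp [pvSplitNL, PySem.Chars.join_singleton]
  | cons c rest ih =>
    intro out buf
    rw [List.foldl_cons]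
    by_cases hc : c = '\n'
    · subst hc
      rw [show pvStep (out, buf) '\n' = (out ++ [pvDecorate buf, ['\n']], []) by simp [pvStep]]
      rw [ih]
      obtain ⟨b, bs, hb⟩ : ∃ b bs, pvSplitNL rest [] = b :: bs := by
        cases h : pvSplitNL rest [] with
        | nil => exact absurd h (pvSplitNL_ne_nil rest [])
        | cons b bs => exact ⟨b, bs, rfl⟩
      simp [pvSplitNL, hb, PySem.Chars.join_cons_cons]
    · rw [show pvStep (out, buf) c = (out, buf ++ [c]) by simp [pvStep, hc]]
      rw [ih]
      simp [pvSplitNL, hc]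

-- per line: A's elif chain equals B's classify-and-wrap, at the character-list level
theorem pvLine_eq (line : String) : (pvFmtA line).toList = pvDecorate line.toList := by
  unfold pvFmtA pvDecorate pvClassify
  simp only [PySem.Str.startswith, PySem.Str.isIn, PySem.Str.strip, PySem.Str.len,
    PySem.Str.pyGet?, PySem.Str.slice, String.toList_ofList]
  have hlen : ((((PySem.Chars.strip line.toList).length : Int)) == 0)
      = ((PySem.Chars.strip line.toList).length == 0) := by
    cases h : (PySem.Chars.strip line.toList).length == 0 <;> simp_all
  rw [hlen]
  generalize PySem.Chars.strip line.toList = s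
  generalize (PySem.Chars.startswith s "v".toList && PySem.Chars.isIn "(".toList s) = b1
  generalize (PySem.Chars.isIn "===".toList s) = b2
  generalize (PySem.Chars.startswith s "NEW".toList || PySem.Chars.startswith s "FIXED".toList ||
      PySem.Chars.startswith s "BUG FIX".toList) = b3
  generalize (PySem.Chars.startswith s "IMPROVEMENTS".toList ||
      PySem.Chars.startswith s "PRESERVED".toList) = b4
  generalize (PySem.Chars.startswith s "-".toList) = b5
  generalize ((!(s.length == 0)) &&
      (match PySem.Chars.pyGet? s 0 with | some c => PySem.Chars.isdigit c | none => false) &&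
      PySem.Chars.isIn ".".toList (PySem.Chars.slice s none (some 3))) = b6
  cases b1 <;> cases b2 <;> cases b3 <;> cases b4 <;> cases b5 <;> cases b6 <;>
    simp [String.toList_append]

-- ===== VERDICT (by name: the statement is the Claim_ definition above) =====
theorem format_changelog_spec : Claim_equal_format_changelog := by
  intro content _
  unfold Spec_format_changelog format_changelog format_changelog_alt
  dsimp only
  rw [PySem.List.foldl_append_singleton_eq_map pvFmtA, List.nil_append]
  rw [PySem.Str.split?, PySem.Chars.split?]
  rw [if_neg (by decide)]
  have hnl : ("\n" : String).toList = ['\n'] := rfl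
  rw [hnl, pvSplitOn_eq]
  rw [PySem.Str.join]
  apply congrArg String.ofList
  rw [pvStream_inv content.toList [] []]
  simp [List.map_map, Function.comp_def, pvLine_eq]
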